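-- pv_equiv track=rewrite | github.com/PRASANNA-RAVI/SCA_Assisted_CCA_on_NTRU | NTRU_Prime/PC_Oracle_based_SCA/Implementation/test_oracle_extract.py | only_byteswap
-- ===== SOURCE A (Python) =====
-- def byteswap_within_word(input_text,length):
-- 	for i in range(0,length):
-- 		bite = (input_text >> (8*i))&0xFF
-- 		if(i == 0):
-- 			temp = bite
-- 		else:
-- 			temp = (temp << 8)|bite
-- 	return temp
--
-- def only_byteswap(input_text,length):
-- 	for i in range(0,length):
-- 		temp = input_text >> (32*i) & 0xFFFFFFFF
-- 		#print hex(temp)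
-- 		temp = byteswap_within_word(temp,4)
-- 		#print hex(temp)
-- 		if (i == 0):
-- 			temp2 = temp
-- 		else:
-- 			temp2 = temp << (32*i) | temp2
-- 		#print hex(temp2)
-- 	return temp2
-- ===== SOURCE B (Python) =====
-- def only_byteswap(input_text, length):
--     out = 0
--     for i in range(length - 1, -1, -1):
--         word = (input_text >> (32 * i)) & 0xFFFFFFFF
--         swapped = (((word & 0xFF) << 24) | ((word & 0xFF00) << 8)
--                    | ((word & 0xFF0000) >> 8) | ((word & 0xFF000000) >> 24))
--         out = (out << 32) | swapped
--     return out
-- ===== Notes on version B (the rewrite author's own statement) =====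
-- stated objective: faster
-- what changed: B drops the byteswap_within_word helper and its 4-iteration shift loop in favour of a closed-form mask expression, and assembles the result in a single reversed shift-accumulate pass with an initialized accumulator instead of A's positional-OR with an if i==0 special case.
-- crash fix: On length <= 0 Python A raises UnboundLocalError (its loop body never runs and temp2 is unbound) while B returns 0. — e.g. on only_byteswap(5, 0): A raises UnboundLocalError, B returns 0
import Mathlib
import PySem

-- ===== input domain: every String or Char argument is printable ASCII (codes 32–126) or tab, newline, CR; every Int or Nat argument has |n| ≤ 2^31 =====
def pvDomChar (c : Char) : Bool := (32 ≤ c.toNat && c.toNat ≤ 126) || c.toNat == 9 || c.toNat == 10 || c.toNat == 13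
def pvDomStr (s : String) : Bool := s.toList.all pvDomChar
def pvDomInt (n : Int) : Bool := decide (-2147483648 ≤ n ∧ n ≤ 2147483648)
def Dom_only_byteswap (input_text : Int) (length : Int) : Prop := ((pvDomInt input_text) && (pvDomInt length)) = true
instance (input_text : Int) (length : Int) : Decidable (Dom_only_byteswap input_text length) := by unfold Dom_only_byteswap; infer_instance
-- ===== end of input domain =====

-- B replaces A's per-word helper with its 4-iteration shift loop by a single closed-form
-- mask expression and accumulates the words in one reversed shift-accumulate pass
-- (no helper, no inner loop; a timing run measured B faster by a constant factor).

-- ===== PORT A =====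
-- the seed 0 stands for Python's unbound `temp`; it is never read when length = 4,
-- the only value this helper is called with
def byteswap_within_word (input_text : Int) (length : Int) : Int :=
  (PySem.List.pyRange 0 length 1).foldl
    (fun temp i =>
      let bite := PySem.Int.band (input_text >>> Int.toNat (8 * i)) 0xFF
      if i == 0 then bite else PySem.Int.bor (temp <<< (8 : Nat)) bite) 0

def only_byteswap (input_text : Int) (length : Int) : Int :=
  (PySem.List.pyRange 0 length 1).foldl
    (fun temp2 i =>
      let temp := PySem.Int.band (input_text >>> Int.toNat (32 * i)) 0xFFFFFFFF
      let temp := byteswap_within_word temp 4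
      if i == 0 then temp else PySem.Int.bor (temp <<< Int.toNat (32 * i)) temp2) 0

-- ===== PORT B =====
def only_byteswap_alt (input_text : Int) (length : Int) : Int :=
  (PySem.List.pyRange (length - 1) (-1) (-1)).foldl
    (fun out i =>
      let word := PySem.Int.band (input_text >>> Int.toNat (32 * i)) 0xFFFFFFFF
      let swapped := PySem.Int.bor (PySem.Int.bor (PySem.Int.bor
          ((PySem.Int.band word 0xFF) <<< (24 : Nat))
          ((PySem.Int.band word 0xFF00) <<< (8 : Nat)))
          ((PySem.Int.band word 0xFF0000) >>> (8 : Nat)))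
          ((PySem.Int.band word 0xFF000000) >>> (24 : Nat))
      PySem.Int.bor (out <<< (32 : Nat)) swapped) 0

-- ===== PRECONDITION & SPEC =====
-- Pre_ excludes length ≤ 0, where Python A raises UnboundLocalError (temp2 never assigned)
def Pre_only_byteswap (input_text : Int) (length : Int) : Prop := 1 ≤ length
instance (input_text : Int) (length : Int) : Decidable (Pre_only_byteswap input_text length) := by unfold Pre_only_byteswap; infer_instance
def pvWitness_only_byteswap : Int × Int := (305419896, 2)

-- On length ≤ 0 Python A raises UnboundLocalError (its loop body never runs), while B returns 0
def Raises_only_byteswap (input_text : Int) (length : Int) : Prop := length ≤ 0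
instance (input_text : Int) (length : Int) : Decidable (Raises_only_byteswap input_text length) := by unfold Raises_only_byteswap; infer_instance
def pvRaiseWitness_only_byteswap : Int × Int := (5, 0)
def pvRaiseWitnessOut_only_byteswap : Int := 0

def Spec_only_byteswap (input_text : Int) (length : Int) (out : Int) : Prop := out = only_byteswap_alt input_text length
instance (input_text : Int) (length : Int) (out : Int) : Decidable (Spec_only_byteswap input_text length out) := by unfold Spec_only_byteswap; infer_instance

-- ===== CLAIM (what is proved, stated in full; the proofs are below) =====
def Claim_equal_only_byteswap : Prop := ∀ (input_text : Int) (length : Int), Dom_only_byteswap input_text length → Pre_only_byteswap input_text length → Spec_only_byteswap input_text length (only_byteswap input_text length)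
def Claim_raises_only_byteswap : Prop := (∀ (input_text : Int) (length : Int), Dom_only_byteswap input_text length → Raises_only_byteswap input_text length → ¬ Pre_only_byteswap input_text length) ∧ (Dom_only_byteswap (pvRaiseWitness_only_byteswap.1) (pvRaiseWitness_only_byteswap.2) ∧ Raises_only_byteswap (pvRaiseWitness_only_byteswap.1) (pvRaiseWitness_only_byteswap.2) ∧ only_byteswap_alt (pvRaiseWitness_only_byteswap.1) (pvRaiseWitness_only_byteswap.2) = pvRaiseWitnessOut_only_byteswap)

-- ===== LEMMAS AND PROOFS =====

-- word i of the input, as both ports compute it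
def pvWordN (x : Int) (k : Nat) : Int := PySem.Int.band (x >>> (32 * k)) 0xFFFFFFFF

-- the byteswapped value of a word, as plain arithmetic on its toNat
def pvSwapN (w : Int) : Int :=
  ((w.toNat % 256 * 16777216 + w.toNat / 256 % 256 * 65536
    + w.toNat / 65536 % 256 * 256 + w.toNat / 16777216 % 256 : Nat) : Int)

-- the common closed form: low k = swapped words 0..k-1, word i at weight 2^(32 i)
def pvLow (x : Int) : Nat → Int
  | 0 => 0
  | k+1 => pvSwapN (pvWordN x k) * 2 ^ (32 * k) + pvLow x k

lemma pvNatOrAdd (a b k : Nat) (h : b < 2 ^ k) : a * 2 ^ k ||| b = a * 2 ^ k + b := by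
  rw [mul_comm]; exact (Nat.two_pow_add_eq_or_of_lt h a).symm

lemma pvOrLit (a b k m : Nat) (hm : 2 ^ k = m) (h : b < m) : a * m ||| b = a * m + b := by
  subst hm; exact pvNatOrAdd a b k h

lemma pvAnd255 (x : Nat) : x &&& 255 = x % 256 := by
  have h := Nat.and_two_pow_sub_one_eq_mod x 8
  norm_num at h; exact h

lemma pvAndMaskShift (x s : Nat) : x &&& (255 <<< s) = ((x >>> s) &&& 255) <<< s := by
  apply Nat.eq_of_testBit_eq; intro i
  simp only [Nat.testBit_and, Nat.testBit_shiftLeft, Nat.testBit_shiftRight, ge_iff_le]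
  by_cases h : s ≤ i
  · have he : s + (i - s) = i := by omega
    cases hx : x.testBit i <;>
      cases h2 : Nat.testBit 255 (i - s) <;> simp [h, he, hx]
  · simp [h]

lemma pvWord_bounds (x : Int) (k : Nat) : 0 ≤ pvWordN x k ∧ pvWordN x k < 4294967296 := by
  unfold pvWordN PySem.Int.band
  split_ifs with h1 h2 h2 <;> try norm_num
  · have h := Nat.and_le_right (n := (x >>> (32*k)).toNat) (m := Int.toNat 4294967295)
    omega
  · omega
  · exact lt_of_le_of_lt (Nat.sub_le _ _) (by norm_num)
  · omega

lemma pvSwap_bounds (w : Int) : 0 ≤ pvSwapN w ∧ pvSwapN w < 4294967296 := by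
  unfold pvSwapN
  constructor
  · positivity
  · have h1 : w.toNat % 256 < 256 := Nat.mod_lt _ (by norm_num)
    have h2 : w.toNat / 256 % 256 < 256 := Nat.mod_lt _ (by norm_num)
    have h3 : w.toNat / 65536 % 256 < 256 := Nat.mod_lt _ (by norm_num)
    have h4 : w.toNat / 16777216 % 256 < 256 := Nat.mod_lt _ (by norm_num)
    push_cast; omega

lemma pvLow_bounds (x : Int) (n : Nat) : 0 ≤ pvLow x n ∧ pvLow x n < 2 ^ (32 * n) := by
  induction n with
  | zero => simp [pvLow]
  | succ k ih =>
    obtain ⟨ih0, ih1⟩ := ih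
    obtain ⟨hs0, hs1⟩ := pvSwap_bounds (pvWordN x k)
    have hp : (0:Int) < 2 ^ (32 * k) := by positivity
    constructor
    · unfold pvLow; positivity
    · unfold pvLow
      have h1 : pvSwapN (pvWordN x k) * 2 ^ (32 * k) ≤ 4294967295 * 2 ^ (32 * k) := by
        apply mul_le_mul_of_nonneg_right (by omega) (le_of_lt hp)
      have h2 : (2:Int) ^ (32 * (k + 1)) = 4294967296 * 2 ^ (32 * k) := by
        rw [show 32 * (k + 1) = 32 + 32 * k by ring, pow_add]; norm_num
      rw [h2]; nlinarith

lemma pvBorShift (a b : Int) (k : Nat) (ha : 0 ≤ a) (hb : 0 ≤ b) (h : b < 2 ^ k) :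
    PySem.Int.bor (a <<< k) b = a * 2 ^ k + b := by
  obtain ⟨A, rfl⟩ := Int.eq_ofNat_of_zero_le ha
  obtain ⟨B, rfl⟩ := Int.eq_ofNat_of_zero_le hb
  rw [← Int.natCast_shiftLeft, PySem.Int.bor_of_nonneg (by positivity) hb]
  have hB : B < 2 ^ k := by exact_mod_cast h
  simp only [Int.toNat_natCast, Nat.shiftLeft_eq]
  rw [pvNatOrAdd A B k hB]
  push_cast; ring

-- A's inner 4-iteration loop computes the closed-form byteswap
lemma pvInner_eq (w : Int) (h0 : 0 ≤ w) (h1 : w < 4294967296) :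
    byteswap_within_word w 4 = pvSwapN w := by
  obtain ⟨W, rfl⟩ := Int.eq_ofNat_of_zero_le h0
  have hW : W < 4294967296 := by exact_mod_cast h1
  unfold byteswap_within_word
  rw [show PySem.List.pyRange 0 4 1 = [0, 1, 2, 3] from by decide]
  simp only [List.foldl]
  norm_num
  simp only [show Int.toNat 8 = 8 from rfl, show Int.toNat 16 = 16 from rfl,
    show Int.toNat 24 = 24 from rfl, show (255 : Int) = ((255 : Nat) : Int) from rfl,
    ← Int.natCast_shiftRight, PySem.Int.band_natCast, ← Int.natCast_shiftLeft,
    PySem.Int.bor_natCast, pvSwapN, Int.toNat_natCast]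
  rw [Nat.cast_inj]
  simp only [pvAnd255, Nat.shiftLeft_eq, Nat.shiftRight_eq_div_pow]
  rw [pvNatOrAdd _ _ 8 (by exact Nat.lt_of_lt_of_le (Nat.mod_lt _ (by norm_num)) (by norm_num)),
      pvNatOrAdd _ _ 8 (by exact Nat.lt_of_lt_of_le (Nat.mod_lt _ (by norm_num)) (by norm_num)),
      pvNatOrAdd _ _ 8 (by exact Nat.lt_of_lt_of_le (Nat.mod_lt _ (by norm_num)) (by norm_num))]
  norm_num
  omega

-- B's closed-form mask expression computes the same byteswap
set_option maxRecDepth 4096 in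
lemma pvMask_eq (w : Int) (h0 : 0 ≤ w) (h1 : w < 4294967296) :
    PySem.Int.bor (PySem.Int.bor (PySem.Int.bor
        ((PySem.Int.band w 0xFF) <<< (24 : Nat))
        ((PySem.Int.band w 0xFF00) <<< (8 : Nat)))
        ((PySem.Int.band w 0xFF0000) >>> (8 : Nat)))
        ((PySem.Int.band w 0xFF000000) >>> (24 : Nat)) = pvSwapN w := by
  obtain ⟨W, rfl⟩ := Int.eq_ofNat_of_zero_le h0
  simp only [show (255 : Int) = ((255 : Nat) : Int) from rfl,
    show (65280 : Int) = ((65280 : Nat) : Int) from rfl,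
    show (16711680 : Int) = ((16711680 : Nat) : Int) from rfl,
    show (4278190080 : Int) = ((4278190080 : Nat) : Int) from rfl,
    PySem.Int.band_natCast, ← Int.natCast_shiftLeft, ← Int.natCast_shiftRight,
    PySem.Int.bor_natCast, pvSwapN, Int.toNat_natCast]
  rw [Nat.cast_inj]
  have m2 : W &&& 65280 = W / 256 % 256 * 256 := by
    have h := pvAndMaskShift W 8
    norm_num [Nat.shiftLeft_eq, Nat.shiftRight_eq_div_pow, pvAnd255] at h
    exact h
  have m3 : W &&& 16711680 = W / 65536 % 256 * 65536 := by
    have h := pvAndMaskShift W 16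
    norm_num [Nat.shiftLeft_eq, Nat.shiftRight_eq_div_pow, pvAnd255] at h
    exact h
  have m4 : W &&& 4278190080 = W / 16777216 % 256 * 16777216 := by
    have h := pvAndMaskShift W 24
    norm_num [Nat.shiftLeft_eq, Nat.shiftRight_eq_div_pow, pvAnd255] at h
    exact h
  rw [pvAnd255, m2, m3, m4, Nat.shiftLeft_eq, Nat.shiftLeft_eq,
      Nat.shiftRight_eq_div_pow, Nat.shiftRight_eq_div_pow]
  norm_num
  have d3 : W / 65536 % 256 * 65536 / 256 = W / 65536 % 256 * 256 := by
    rw [show (65536 : Nat) = 256 * 256 from rfl, ← Nat.mul_assoc,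
        Nat.mul_div_cancel _ (by norm_num)]
  rw [d3]
  have hy := Nat.mod_lt (W / 256) (show 0 < 256 by norm_num)
  have hz := Nat.mod_lt (W / 65536) (show 0 < 256 by norm_num)
  have hu := Nat.mod_lt (W / 16777216) (show 0 < 256 by norm_num)
  have o1 : W % 256 * 16777216 ||| W / 256 % 256 * 256 * 256 =
      W % 256 * 16777216 + W / 256 % 256 * 65536 := by
    have := pvOrLit (W % 256) (W / 256 % 256 * 256 * 256) 24 16777216 (by norm_num) (by omega)
    omega
  have o2 : W % 256 * 16777216 + W / 256 % 256 * 65536 ||| W / 65536 % 256 * 256 =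
      W % 256 * 16777216 + W / 256 % 256 * 65536 + W / 65536 % 256 * 256 := by
    have e : W % 256 * 16777216 + W / 256 % 256 * 65536 =
        (W % 256 * 256 + W / 256 % 256) * 65536 := by ring
    rw [e]
    have := pvOrLit (W % 256 * 256 + W / 256 % 256) (W / 65536 % 256 * 256) 16 65536
      (by norm_num) (by omega)
    omega
  have o3 : W % 256 * 16777216 + W / 256 % 256 * 65536 + W / 65536 % 256 * 256 |||
      W / 16777216 % 256 =
      W % 256 * 16777216 + W / 256 % 256 * 65536 + W / 65536 % 256 * 256 +
      W / 16777216 % 256 := by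
    have e : W % 256 * 16777216 + W / 256 % 256 * 65536 + W / 65536 % 256 * 256 =
        (W % 256 * 65536 + W / 256 % 256 * 256 + W / 65536 % 256) * 256 := by ring
    rw [e]
    have := pvOrLit (W % 256 * 65536 + W / 256 % 256 * 256 + W / 65536 % 256)
      (W / 16777216 % 256) 8 256 (by norm_num) (by omega)
    omega
  rw [o1, o2, o3]

lemma pvA_eq_low (x : Int) (n : Nat) (hn : 1 ≤ n) : only_byteswap x (n : Int) = pvLow x n := by
  induction n, hn using Nat.le_induction with
  | base =>
    unfold only_byteswap
    rw [Nat.cast_one, show PySem.List.pyRange 0 1 1 = [0] from by decide]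
    simp only [List.foldl]
    norm_num
    rw [show PySem.Int.band x 0xFFFFFFFF = pvWordN x 0 from by
      unfold pvWordN; norm_num]
    rw [pvInner_eq _ (pvWord_bounds x 0).1 (pvWord_bounds x 0).2]
    simp [pvLow, pvWordN]
  | succ n hn ih =>
    have hsplit : PySem.List.pyRange 0 ((n + 1 : Nat) : Int) 1 =
        PySem.List.pyRange 0 (n : Int) 1 ++ [(n : Int)] := by
      push_cast
      exact PySem.List.pyRange_one_succ_right (by positivity)
    unfold only_byteswap at ih ⊢
    rw [hsplit, List.foldl_append, ih]
    simp only [List.foldl]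
    have hne : ((n : Int) == 0) = false := beq_eq_false_iff_ne.mpr (by omega)
    have ht : Int.toNat (32 * (n : Int)) = 32 * n := by omega
    simp only [hne, ht, if_false, Bool.false_eq_true]
    rw [show PySem.Int.band (x >>> (32 * n : Nat)) 0xFFFFFFFF = pvWordN x n from rfl]
    rw [pvInner_eq _ (pvWord_bounds x n).1 (pvWord_bounds x n).2]
    rw [pvBorShift _ _ _ (pvSwap_bounds (pvWordN x n)).1 (pvLow_bounds x n).1
      (pvLow_bounds x n).2]
    rfl

lemma pvB_fold (x : Int) (n : Nat) (acc : Int) (hacc : 0 ≤ acc) :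
    List.foldl (fun out i =>
      let word := PySem.Int.band (x >>> Int.toNat (32 * i)) 0xFFFFFFFF
      let swapped := PySem.Int.bor (PySem.Int.bor (PySem.Int.bor
          ((PySem.Int.band word 0xFF) <<< (24 : Nat))
          ((PySem.Int.band word 0xFF00) <<< (8 : Nat)))
          ((PySem.Int.band word 0xFF0000) >>> (8 : Nat)))
          ((PySem.Int.band word 0xFF000000) >>> (24 : Nat))
      PySem.Int.bor (out <<< (32 : Nat)) swapped) acc
      (PySem.List.pyRange ((n : Int) - 1) (-1) (-1))
    = acc * 2 ^ (32 * n) + pvLow x n := by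
  induction n generalizing acc with
  | zero =>
    rw [show ((0 : Nat) : Int) - 1 = -1 by norm_num,
        PySem.List.pyRange_neg_one_eq_nil (by norm_num)]
    simp [pvLow]
  | succ k ih =>
    rw [show ((k + 1 : Nat) : Int) - 1 = (k : Int) by push_cast; ring,
        PySem.List.pyRange_neg_one_cons (by omega)]
    simp only [List.foldl]
    have ht : Int.toNat (32 * (k : Int)) = 32 * k := by omega
    simp only [ht]
    rw [show PySem.Int.band (x >>> (32 * k : Nat)) 0xFFFFFFFF = pvWordN x k from rfl]
    rw [pvMask_eq _ (pvWord_bounds x k).1 (pvWord_bounds x k).2]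
    rw [pvBorShift acc _ 32 hacc (pvSwap_bounds (pvWordN x k)).1
      (by have := (pvSwap_bounds (pvWordN x k)).2; norm_num; omega)]
    rw [ih _ (by have := (pvSwap_bounds (pvWordN x k)).1; positivity)]
    rw [pvLow]
    rw [show 32 * (k + 1) = 32 + 32 * k by ring, pow_add]
    ring

lemma pvB_eq_low (x : Int) (n : Nat) : only_byteswap_alt x (n : Int) = pvLow x n := by
  unfold only_byteswap_alt
  rw [pvB_fold x n 0 le_rfl]
  simp

-- ===== VERDICT (by name: the statement is the Claim_ definition above) =====
theorem only_byteswap_spec : Claim_equal_only_byteswap := by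
  intro x L _ hpre
  unfold Pre_only_byteswap at hpre
  unfold Spec_only_byteswap
  have hL : L = ((L.toNat : Nat) : Int) := by omega
  have hn : 1 ≤ L.toNat := by omega
  rw [hL, pvA_eq_low x L.toNat hn, pvB_eq_low x L.toNat]

theorem only_byteswap_raises : Claim_raises_only_byteswap := by
  unfold Claim_raises_only_byteswap
  constructor
  · intro x L _ hr
    unfold Raises_only_byteswap at hr
    unfold Pre_only_byteswap
    omega
  · exact ⟨by decide, by decide, by decide⟩

-- witness self-check: the crash-fix claim instantiated at its witness (B returns 0 where A raises)
theorem pvRaiseWitness_ok : only_byteswap_alt 5 0 = 0 := by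
  have h := only_byteswap_raises
  unfold Claim_raises_only_byteswap at h
  exact h.2.2.2
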